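-- pv_equiv track=rewrite | github.com/ealipatov/pythonJunior | home_work/main.py | number_operation_without_zero
-- ===== SOURCE A (Python) =====
-- def number_operation_without_zero(n, m):
--     result = 1
--     while n <= m:
--         if n == 0:
--             n += 1
--         else:
--             result *= n
--             n += 1
--     return result
-- ===== SOURCE B (Python) =====
-- def number_operation_without_zero(n, m):
--     def prod_range(a, b):
--         # product of the integers a..b by balanced divide and conquer
--         if a > b:
--             return 1
--         if a == b:
--             return a
--         mid = (a + b) // 2
--         return prod_range(a, mid) * prod_range(mid + 1, b)
--     if n <= 0 <= m:
--         return prod_range(n, -1) * prod_range(1, m)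
--     return prod_range(n, m)
-- ===== Notes on version B (the rewrite author's own statement) =====
-- stated objective: alternative
-- what changed: Replaced A's linear accumulating while-loop with an in-loop zero test by a balanced divide-and-conquer recursion that multiplies the two half-range products, with zero removed once up front by splitting the range at zero.
import Mathlib
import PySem

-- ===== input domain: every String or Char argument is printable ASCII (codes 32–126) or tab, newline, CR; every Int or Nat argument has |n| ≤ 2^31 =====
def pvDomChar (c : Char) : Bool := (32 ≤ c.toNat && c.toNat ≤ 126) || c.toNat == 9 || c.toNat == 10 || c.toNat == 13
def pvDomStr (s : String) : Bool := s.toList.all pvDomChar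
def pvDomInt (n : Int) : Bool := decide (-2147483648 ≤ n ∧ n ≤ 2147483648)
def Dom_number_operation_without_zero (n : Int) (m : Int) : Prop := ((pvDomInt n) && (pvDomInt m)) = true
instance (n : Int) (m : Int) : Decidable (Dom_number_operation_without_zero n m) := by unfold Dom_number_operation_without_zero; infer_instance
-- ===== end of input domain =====

-- B replaces A's linear accumulating while-loop (with an in-loop zero test) by a balanced
-- divide-and-conquer range product, removing zero once up front by splitting the range at 0;
-- objective: alternative decomposition, same input-output behaviour.

-- ===== PORT A =====
-- while n <= m: skip 0, else result *= n; n += 1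
def pvLoopA (n m result : Int) : Int :=
  if n ≤ m then
    if n = 0 then pvLoopA (n + 1) m result
    else pvLoopA (n + 1) m (result * n)
  else result
termination_by (m + 1 - n).toNat
decreasing_by all_goals omega

def number_operation_without_zero (n : Int) (m : Int) : Int := pvLoopA n m 1

-- ===== PORT B =====
-- prod_range(a, b): balanced divide and conquer; mid = (a + b) // 2
def pvProdRange (a b : Int) : Int :=
  if a > b then 1
  else if a = b then a
  else
    pvProdRange a (PySem.Int.floordiv (a + b) 2) *
    pvProdRange (PySem.Int.floordiv (a + b) 2 + 1) b
termination_by (b - a).toNat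
decreasing_by
  all_goals
    have _h3 := (PySem.Int.le_floordiv_iff_mul_le (a := a + b) (q := a) (by omega : (0:Int) < 2)).mpr (by omega)
    have _h4 := (PySem.Int.floordiv_lt_iff_lt_mul (a := a + b) (q := b) (by omega : (0:Int) < 2)).mpr (by omega)
    omega

def number_operation_without_zero_alt (n : Int) (m : Int) : Int :=
  if n ≤ 0 ∧ 0 ≤ m then pvProdRange n (-1) * pvProdRange 1 m
  else pvProdRange n m

-- ===== PRECONDITION & SPEC =====
def Spec_number_operation_without_zero (n : Int) (m : Int) (out : Int) : Prop := out = number_operation_without_zero_alt n m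
instance (n : Int) (m : Int) (out : Int) : Decidable (Spec_number_operation_without_zero n m out) := by unfold Spec_number_operation_without_zero; infer_instance

-- ===== CLAIM (what is proved, stated in full; the proofs are below) =====
def Claim_equal_number_operation_without_zero : Prop := ∀ (n : Int) (m : Int), Dom_number_operation_without_zero n m → Spec_number_operation_without_zero n m (number_operation_without_zero n m)

-- ===== LEMMAS AND PROOFS =====

-- the linear range product, the common reference both sides are reduced to
def pvLin (a b : Int) : Int := (PySem.List.pyRange a (b + 1) 1).foldl (· * ·) 1

theorem pv_foldl_mul (l : List Int) (a : Int) : l.foldl (· * ·) a = a * l.foldl (· * ·) 1 := by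
  induction l generalizing a with
  | nil => simp
  | cons x xs ih =>
    simp only [List.foldl_cons]
    rw [ih (a * x), ih (1 * x)]; ring

-- B's divide and conquer computes the linear range product
theorem pvProdRange_eq_lin (a b : Int) : pvProdRange a b = pvLin a b := by
  rw [pvProdRange]
  split_ifs with hgt heq
  · unfold pvLin
    rw [PySem.List.pyRange_one_eq_nil (by omega : b + 1 ≤ a)]
    simp
  · subst heq
    unfold pvLin
    rw [PySem.List.pyRange_one_cons (by omega : a < a + 1),
        PySem.List.pyRange_one_eq_nil (by omega : a + 1 ≤ a + 1)]
    simp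
  · have _h3 := (PySem.Int.le_floordiv_iff_mul_le (a := a + b) (q := a) (by omega : (0:Int) < 2)).mpr (by omega)
    have _h4 := (PySem.Int.floordiv_lt_iff_lt_mul (a := a + b) (q := b) (by omega : (0:Int) < 2)).mpr (by omega)
    rw [pvProdRange_eq_lin a _, pvProdRange_eq_lin _ b]
    unfold pvLin
    rw [PySem.List.pyRange_one_append a (PySem.Int.floordiv (a + b) 2 + 1) (b + 1)
          (by omega) (by omega),
        List.foldl_append,
        pv_foldl_mul (PySem.List.pyRange (PySem.Int.floordiv (a + b) 2 + 1) (b + 1) 1)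
          (List.foldl (· * ·) 1 (PySem.List.pyRange a (PySem.Int.floordiv (a + b) 2 + 1) 1))]
termination_by (b - a).toNat
decreasing_by
  all_goals
    have _h3 := (PySem.Int.le_floordiv_iff_mul_le (a := a + b) (q := a) (by omega : (0:Int) < 2)).mpr (by omega)
    have _h4 := (PySem.Int.floordiv_lt_iff_lt_mul (a := a + b) (q := b) (by omega : (0:Int) < 2)).mpr (by omega)
    omega


-- A's loop computes the linear products of the two halves split at zero
theorem pvLoopA_eq (n m r : Int) : pvLoopA n m r = r * (pvLin n (min m (-1)) * pvLin (max n 1) m) := by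
  rw [pvLoopA]
  split_ifs with hle h0
  · -- n ≤ m, n = 0
    subst h0
    rw [pvLoopA_eq (0 + 1) m r]
    unfold pvLin
    rw [PySem.List.pyRange_one_eq_nil (by omega : min m (-1) + 1 ≤ (0 : Int)),
        PySem.List.pyRange_one_eq_nil (by omega : min m (-1) + 1 ≤ (0 : Int) + 1)]
    norm_num
  · -- n ≤ m, n ≠ 0
    rw [pvLoopA_eq (n + 1) m (r * n)]
    by_cases hneg : n < 0
    · have hmax : max n 1 = max (n + 1) 1 := by omega
      unfold pvLin
      rw [hmax, PySem.List.pyRange_one_cons (by omega : n < min m (-1) + 1)]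
      simp only [List.foldl_cons]
      rw [pv_foldl_mul _ (1 * n)]
      ring
    · have h1 : 1 ≤ n := by omega
      unfold pvLin
      rw [PySem.List.pyRange_one_eq_nil (by omega : min m (-1) + 1 ≤ n),
          PySem.List.pyRange_one_eq_nil (by omega : min m (-1) + 1 ≤ n + 1)]
      have hm1 : max n 1 = n := by omega
      have hm2 : max (n + 1) 1 = n + 1 := by omega
      rw [hm1, hm2, PySem.List.pyRange_one_cons (by omega : n < m + 1)]
      simp only [List.foldl_cons, List.foldl_nil]
      rw [pv_foldl_mul _ (1 * n)]
      ring
  · unfold pvLin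
    rw [PySem.List.pyRange_one_eq_nil (by omega : min m (-1) + 1 ≤ n),
        PySem.List.pyRange_one_eq_nil (by omega : m + 1 ≤ max n 1)]
    simp
termination_by (m + 1 - n).toNat
decreasing_by all_goals omega

theorem pvLin_empty {a b : Int} (h : b < a) : pvLin a b = 1 := by
  unfold pvLin
  rw [PySem.List.pyRange_one_eq_nil (by omega : b + 1 ≤ a)]
  rfl

-- ===== VERDICT (by name: the statement is the Claim_ definition above) =====
theorem number_operation_without_zero_spec : Claim_equal_number_operation_without_zero := by
  intro n m _
  unfold Spec_number_operation_without_zero number_operation_without_zero number_operation_without_zero_alt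
  rw [pvLoopA_eq]
  split_ifs with h
  · rw [pvProdRange_eq_lin, pvProdRange_eq_lin]
    have h1 : min m (-1) = -1 := by omega
    have h2 : max n 1 = 1 := by omega
    rw [h1, h2]; ring
  · rw [pvProdRange_eq_lin]
    by_cases hm : m < 0
    · have h1 : min m (-1) = m := by omega
      rw [h1, pvLin_empty (show m < max n 1 by omega)]
      ring
    · have h2 : max n 1 = n := by omega
      rw [h2, pvLin_empty (show min m (-1) < n by omega)]
      ring
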